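-- pv_equiv track=rewrite | github.com/LucasDelav/PLAMS | redox_calc.py | select_best_calculation
-- ===== SOURCE A (Python) =====
-- def select_best_calculation(calc_dirs):
--     """
--     Sélectionne le meilleur calcul parmi une liste de dossiers selon les priorités:
--     1. Correction avec numéro le plus élevé
--     2. Préférence pour 'neg' sur 'pos'
--     3. Calcul standard si aucun calcul corrigé n'est disponible
--
--     Args:
--         calc_dirs (list): Liste des noms de dossiers de calculs
--
--     Returns:
--         str: Nom du meilleur dossier, ou None si aucun dossier valide
--     """
--     if not calc_dirs:
--         return None
--
--     # Séparer les calculs standards et les calculs corrigés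
--     standard = []
--     corrected_info = []  # Liste de tuples (dir_name, corr_num, is_neg, is_pos)
--
--     for dir_name in calc_dirs:
--         parts = dir_name.split('_')
--
--         # Vérifier s'il s'agit d'un calcul standard (se termine par _opt)
--         if "corr" not in parts and dir_name.endswith("_opt"):
--             standard.append(dir_name)
--             continue
--
--         # Traiter les calculs corrigés
--         try:
--             # Trouver l'index de "corr"
--             if "corr" in parts:
--                 corr_idx = parts.index("corr")
--                 corr_num = int(parts[corr_idx + 1])
--
--                 # Déterminer si pos ou neg
--                 is_neg = "neg" in parts
--                 is_pos = "pos" in parts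
--
--                 corrected_info.append((dir_name, corr_num, is_neg, is_pos))
--         except (ValueError, IndexError):
--             # Si nous ne pouvons pas extraire correctement l'info, on l'ignore
--             continue
--
--     # Trier selon les priorités: numéro de correction décroissant, puis neg > pos
--     if corrected_info:
--         sorted_info = sorted(corrected_info,
--                              key=lambda x: (-x[1], x[2], -x[3]))  # -x[1] pour trier par corr_num décroissant
--         return sorted_info[0][0]  # Retourner le nom du meilleur dossier
--
--     # Si aucun calcul corrigé n'est disponible ou valide, utiliser le calcul standard
--     if standard:
--         return standard[0]
--
--     # Si rien n'est disponible, retourner le premier de la liste originale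
--     return calc_dirs[0] if calc_dirs else None
-- ===== SOURCE B (Python) =====
-- def select_best_calculation(calc_dirs):
--     """Single-pass argmin: each dir gets one combined priority key; track the first best."""
--     best = None  # (key, dir_name)
--     for dir_name in calc_dirs:
--         parts = dir_name.split('_')
--         if "corr" in parts:
--             idx = parts.index("corr")
--             try:
--                 num = int(parts[idx + 1])
--                 key = (0, -num,
--                        1 if "neg" in parts else 0,
--                        -1 if "pos" in parts else 0)
--             except (ValueError, IndexError):
--                 key = (2, 0, 0, 0)
--         elif dir_name.endswith("_opt"):
--             key = (1, 0, 0, 0)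
--         else:
--             key = (2, 0, 0, 0)
--         if best is None or key < best[0]:
--             best = (key, dir_name)
--     return best[1] if best is not None else None
-- ===== Notes on version B (the rewrite author's own statement) =====
-- stated objective: alternative
-- what changed: Replaces A's two accumulated lists (standard/corrected), the sort of corrected_info and the if/elif fallback cascade by a single pass that assigns every directory one combined lexicographic priority key (tier, -corr_num, neg, -pos) and tracks the first-wins argmin.
import Mathlib
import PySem

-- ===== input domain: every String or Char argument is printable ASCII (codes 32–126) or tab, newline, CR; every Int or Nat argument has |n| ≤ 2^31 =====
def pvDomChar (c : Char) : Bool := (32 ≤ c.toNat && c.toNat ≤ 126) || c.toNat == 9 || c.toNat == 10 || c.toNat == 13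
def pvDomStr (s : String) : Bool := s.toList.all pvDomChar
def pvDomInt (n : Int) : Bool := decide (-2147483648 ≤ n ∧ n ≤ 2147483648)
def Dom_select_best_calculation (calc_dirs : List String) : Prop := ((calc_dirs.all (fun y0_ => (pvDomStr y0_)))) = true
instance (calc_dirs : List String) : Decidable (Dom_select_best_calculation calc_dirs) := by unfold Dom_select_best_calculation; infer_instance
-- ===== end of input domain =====

-- B replaces A's two accumulated lists, sort and if/elif cascade by a single-pass argmin over one
-- combined priority key (objective: alternative decomposition, same asymptotic cost up to the removed sort).

-- ===== PORT A =====
-- Python bool as int (False = 0, True = 1), as used inside A's sort key tuple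
def pvB (b : Bool) : Int := if b then 1 else 0

-- one iteration of A's "for dir_name in calc_dirs" loop over the state (standard, corrected_info)
def pvStepA (acc : List String × List (String × Int × Bool × Bool)) (dir_name : String) :
    List String × List (String × Int × Bool × Bool) :=
  let parts := (PySem.Str.split? dir_name "_").getD []  -- sep "_" ≠ "", so split? is always `some`
  if "corr" ∉ parts ∧ PySem.Str.endswith dir_name "_opt" then
    (acc.1 ++ [dir_name], acc.2)
  else
    match PySem.List.index? parts "corr" with
    | none => acc  -- "corr" not in parts: the `if "corr" in parts` guard fails, nothing appended
    | some corr_idx =>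
      match PySem.List.pyGet? parts ((corr_idx : Int) + 1) with
      | none => acc  -- IndexError caught
      | some p =>
        match PySem.Int.ofStr? p with
        | none => acc  -- ValueError caught
        | some corr_num =>
          (acc.1, acc.2 ++ [(dir_name, corr_num, decide ("neg" ∈ parts), decide ("pos" ∈ parts))])

def select_best_calculation (calc_dirs : List String) : Option String :=
  match calc_dirs with
  | [] => none
  | _ :: _ =>
    let sc := calc_dirs.foldl pvStepA ([], [])
    -- key=lambda x: (-x[1], x[2], -x[3]); the bool pair (x[2], -x[3]) is packed order-isomorphically
    -- into the single Int 2*x[2] - x[3] for sorted2 (PySem's tuple-key form)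
    match PySem.List.sorted2 sc.2 (fun x => -x.2.1) (fun x => 2 * pvB x.2.2.1 - pvB x.2.2.2) with
    | x :: _ => some x.1  -- sorted_info[0][0]  (sorted2 is nonempty iff corrected_info is)
    | [] =>
      match sc.1 with
      | s :: _ => some s  -- standard[0]
      | [] => calc_dirs.head?  -- calc_dirs[0] if calc_dirs else None

-- ===== PORT B =====
-- combined priority key of one directory name (tier, -corr_num, neg-bit, -pos-bit)
def pvKey (dir_name : String) : Int × Int × Int × Int :=
  let parts := (PySem.Str.split? dir_name "_").getD []  -- sep "_" ≠ "", so split? is always `some`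
  match PySem.List.index? parts "corr" with
  | some idx =>
    match PySem.List.pyGet? parts ((idx : Int) + 1) with
    | some p =>
      match PySem.Int.ofStr? p with
      | some num => (0, -num, if "neg" ∈ parts then 1 else 0, if "pos" ∈ parts then -1 else 0)
      | none => (2, 0, 0, 0)
    | none => (2, 0, 0, 0)
  | none => if PySem.Str.endswith dir_name "_opt" then (1, 0, 0, 0) else (2, 0, 0, 0)

-- Python's '<' on int 4-tuples: lexicographic (Mathlib's '<' on products is pointwise, hence spelt out)
def pvLtKey (a b : Int × Int × Int × Int) : Bool :=
  decide (a.1 < b.1) || (decide (a.1 = b.1) &&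
    (decide (a.2.1 < b.2.1) || (decide (a.2.1 = b.2.1) &&
      (decide (a.2.2.1 < b.2.2.1) || (decide (a.2.2.1 = b.2.2.1) && decide (a.2.2.2 < b.2.2.2))))))

-- one iteration of B's loop: keep the strictly better (key, dir), first wins on ties
def pvStepB (best : Option ((Int × Int × Int × Int) × String)) (dir_name : String) :
    Option ((Int × Int × Int × Int) × String) :=
  let k := pvKey dir_name
  match best with
  | none => some (k, dir_name)
  | some b => if pvLtKey k b.1 then some (k, dir_name) else some b

def select_best_calculation_alt (calc_dirs : List String) : Option String :=
  (calc_dirs.foldl pvStepB none).map (·.2)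

-- ===== PRECONDITION & SPEC =====
def Spec_select_best_calculation (calc_dirs : List String) (out : Option String) : Prop := out = select_best_calculation_alt calc_dirs
instance (calc_dirs : List String) (out : Option String) : Decidable (Spec_select_best_calculation calc_dirs out) := by unfold Spec_select_best_calculation; infer_instance

-- ===== CLAIM (what is proved, stated in full; the proofs are below) =====
def Claim_equal_select_best_calculation : Prop := ∀ (calc_dirs : List String), Dom_select_best_calculation calc_dirs → Spec_select_best_calculation calc_dirs (select_best_calculation calc_dirs)

-- ===== LEMMAS AND PROOFS =====

-- the strict `before` predicate sorted2 uses for A's key (reverse = false), spelt out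
def pvBefore (a b : String × Int × Bool × Bool) : Bool :=
  decide ((-a.2.1 : Int) < -b.2.1) ||
    (!decide ((-b.2.1 : Int) < -a.2.1) &&
      decide (2 * pvB a.2.2.1 - pvB a.2.2.2 < 2 * pvB b.2.2.1 - pvB b.2.2.2))

-- first-wins minimum of corrected_info under pvBefore
def pvFwmin (c : String × Int × Bool × Bool) (cs : List (String × Int × Bool × Bool)) :
    String × Int × Bool × Bool :=
  cs.foldl (fun m x => if pvBefore x m then x else m) c

-- the (key, dir) pair B's loop state holds after A's state (standard, corrected, first-dir) is known
def pvAKey (st : List String) (co : List (String × Int × Bool × Bool)) (fb : String) :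
    (Int × Int × Int × Int) × String :=
  match co with
  | c :: cs =>
    let m := pvFwmin c cs
    ((0, -m.2.1, pvB m.2.2.1, -pvB m.2.2.2), m.1)
  | [] =>
    match st with
    | s :: _ => ((1, 0, 0, 0), s)
    | [] => ((2, 0, 0, 0), fb)

theorem pv_sorted2_eq (co : List (String × Int × Bool × Bool)) :
    PySem.List.sorted2 co (fun x => -x.2.1) (fun x => 2 * pvB x.2.2.1 - pvB x.2.2.2) =
      co.foldl (fun acc x => PySem.List.insertBy pvBefore x acc) [] := rfl

theorem pv_foldl_insertBy_head {α : Type} (bf : α → α → Bool) :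
    ∀ (l : List α) (y : α) (ys : List α),
      (l.foldl (fun acc x => PySem.List.insertBy bf x acc) (y :: ys)).head? =
        some (l.foldl (fun m x => if bf x m then x else m) y) := by
  intro l
  induction l with
  | nil => intro y ys; rfl
  | cons x l ih =>
    intro y ys
    simp only [List.foldl_cons, PySem.List.insertBy]
    by_cases h : bf x y = true
    · simp [h, ih]
    · simp [h, ih]

theorem pv_ltKey_before (a b : String × Int × Bool × Bool) :
    pvLtKey (0, -a.2.1, pvB a.2.2.1, -pvB a.2.2.2) (0, -b.2.1, pvB b.2.2.1, -pvB b.2.2.2) =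
      pvBefore a b := by
  rcases a with ⟨_, na, xa, ya⟩
  rcases b with ⟨_, nb, xb, yb⟩
  simp only [pvLtKey, pvBefore, pvB]
  rcases lt_trichotomy na nb with h | h | h <;>
    cases xa <;> cases xb <;> cases ya <;> cases yb <;>
      simp_all <;> omega

-- keys of tier 1 and 2 never beat an existing best of the same-or-lower tier, tier 0 beats 1 and 2
theorem pv_step (st : List String) (co : List (String × Int × Bool × Bool)) (fb d : String) :
    pvStepB (some (pvAKey st co fb)) d =
      some (pvAKey (pvStepA (st, co) d).1 (pvStepA (st, co) d).2 fb) := by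
  by_cases hcnd : ("corr" ∉ (PySem.Str.split? d "_").getD [] ∧ PySem.Str.endswith d "_opt" = true)
  · -- standard dir: tier 1
    have hidx : PySem.List.index? ((PySem.Str.split? d "_").getD []) "corr" = none :=
      (PySem.List.index?_eq_none_iff _ _).mpr hcnd.1
    simp only [pvStepB, pvStepA, pvKey, hidx, hcnd.2, if_true]
    rcases co with _ | ⟨c, cs⟩
    · rcases st with _ | ⟨s, ss⟩ <;> simp [pvAKey, pvLtKey, hcnd.1]
    · simp [pvAKey, pvLtKey, hcnd.1]
  · simp only [pvStepB, pvStepA, pvKey, if_neg hcnd]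
    rcases hsome : PySem.List.index? ((PySem.Str.split? d "_").getD []) "corr" with _ | i
    · -- no "corr" and (because hcnd failed) not ending in "_opt": ignored, tier 2
      have hmem : "corr" ∉ (PySem.Str.split? d "_").getD [] :=
        (PySem.List.index?_eq_none_iff _ _).mp hsome
      have hend : PySem.Str.endswith d "_opt" = false := by
        rcases h : PySem.Str.endswith d "_opt" with _ | _
        · rfl
        · exact absurd ⟨hmem, h⟩ hcnd
      simp only [hsome, hend, Bool.false_eq_true, if_false]
      rcases co with _ | ⟨c, cs⟩
      · rcases st with _ | ⟨s, ss⟩ <;> simp [pvAKey, pvLtKey]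
      · simp [pvAKey, pvLtKey]
    · simp only [hsome]
      rcases hget : PySem.List.pyGet? ((PySem.Str.split? d "_").getD []) ((i : Int) + 1) with _ | p
      · -- IndexError: ignored, tier 2
        simp only [hget]
        rcases co with _ | ⟨c, cs⟩
        · rcases st with _ | ⟨s, ss⟩ <;> simp [pvAKey, pvLtKey]
        · simp [pvAKey, pvLtKey]
      · simp only [hget]
        rcases hnum : PySem.Int.ofStr? p with _ | num
        · -- ValueError: ignored, tier 2
          simp only [hnum]
          rcases co with _ | ⟨c, cs⟩
          · rcases st with _ | ⟨s, ss⟩ <;> simp [pvAKey, pvLtKey]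
          · simp [pvAKey, pvLtKey]
        · -- corrected dir parsed: tier 0
          simp only [hnum]
          by_cases h1 : "neg" ∈ (PySem.Str.split? d "_").getD [] <;>
            by_cases h2 : "pos" ∈ (PySem.Str.split? d "_").getD [] <;>
              simp only [h1, h2, if_true, if_false, decide_true, decide_false]
          · -- neg ∈ parts, pos ∈ parts
            rcases co with _ | ⟨c, cs⟩
            · rcases st with _ | ⟨s, ss⟩ <;> simp [pvAKey, pvFwmin, pvLtKey, pvB]
            · have hk : pvLtKey (0, -num, (1 : Int), (-1 : Int))
                  (0, -(pvFwmin c cs).2.1, pvB (pvFwmin c cs).2.2.1, -pvB (pvFwmin c cs).2.2.2) =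
                  pvBefore (d, num, true, true) (pvFwmin c cs) := by
                have := pv_ltKey_before (d, num, true, true) (pvFwmin c cs)
                simpa [pvB] using this
              simp only [pvAKey, List.cons_append, pvFwmin, List.foldl_append, List.foldl_cons,
                List.foldl_nil] at *
              rw [hk]
              by_cases hb : pvBefore (d, num, true, true)
                  (List.foldl (fun m x => if pvBefore x m = true then x else m) c cs) = true <;>
                simp [hb, pvB]
          · -- neg ∈ parts, pos ∉ parts
            rcases co with _ | ⟨c, cs⟩
            · rcases st with _ | ⟨s, ss⟩ <;> simp [pvAKey, pvFwmin, pvLtKey, pvB]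
            · have hk : pvLtKey (0, -num, (1 : Int), (0 : Int))
                  (0, -(pvFwmin c cs).2.1, pvB (pvFwmin c cs).2.2.1, -pvB (pvFwmin c cs).2.2.2) =
                  pvBefore (d, num, true, false) (pvFwmin c cs) := by
                have := pv_ltKey_before (d, num, true, false) (pvFwmin c cs)
                simpa [pvB] using this
              simp only [pvAKey, List.cons_append, pvFwmin, List.foldl_append, List.foldl_cons,
                List.foldl_nil] at *
              rw [hk]
              by_cases hb : pvBefore (d, num, true, false)
                  (List.foldl (fun m x => if pvBefore x m = true then x else m) c cs) = true <;>
                simp [hb, pvB]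
          · -- neg ∉ parts, pos ∈ parts
            rcases co with _ | ⟨c, cs⟩
            · rcases st with _ | ⟨s, ss⟩ <;> simp [pvAKey, pvFwmin, pvLtKey, pvB]
            · have hk : pvLtKey (0, -num, (0 : Int), (-1 : Int))
                  (0, -(pvFwmin c cs).2.1, pvB (pvFwmin c cs).2.2.1, -pvB (pvFwmin c cs).2.2.2) =
                  pvBefore (d, num, false, true) (pvFwmin c cs) := by
                have := pv_ltKey_before (d, num, false, true) (pvFwmin c cs)
                simpa [pvB] using this
              simp only [pvAKey, List.cons_append, pvFwmin, List.foldl_append, List.foldl_cons,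
                List.foldl_nil] at *
              rw [hk]
              by_cases hb : pvBefore (d, num, false, true)
                  (List.foldl (fun m x => if pvBefore x m = true then x else m) c cs) = true <;>
                simp [hb, pvB]
          · -- neg ∉ parts, pos ∉ parts
            rcases co with _ | ⟨c, cs⟩
            · rcases st with _ | ⟨s, ss⟩ <;> simp [pvAKey, pvFwmin, pvLtKey, pvB]
            · have hk : pvLtKey (0, -num, (0 : Int), (0 : Int))
                  (0, -(pvFwmin c cs).2.1, pvB (pvFwmin c cs).2.2.1, -pvB (pvFwmin c cs).2.2.2) =
                  pvBefore (d, num, false, false) (pvFwmin c cs) := by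
                have := pv_ltKey_before (d, num, false, false) (pvFwmin c cs)
                simpa [pvB] using this
              simp only [pvAKey, List.cons_append, pvFwmin, List.foldl_append, List.foldl_cons,
                List.foldl_nil] at *
              rw [hk]
              by_cases hb : pvBefore (d, num, false, false)
                  (List.foldl (fun m x => if pvBefore x m = true then x else m) c cs) = true <;>
                simp [hb, pvB]

theorem pv_main (fb : String) :
    ∀ (l : List String) (st : List String) (co : List (String × Int × Bool × Bool)),
      l.foldl pvStepB (some (pvAKey st co fb)) =
        some (pvAKey (l.foldl pvStepA (st, co)).1 (l.foldl pvStepA (st, co)).2 fb) := by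
  intro l
  induction l with
  | nil => intro st co; rfl
  | cons d l ih =>
    intro st co
    simp only [List.foldl_cons, pv_step]
    have := ih (pvStepA (st, co) d).1 (pvStepA (st, co) d).2
    simpa using this

theorem pv_step0 (d : String) :
    pvStepB none d = some (pvAKey (pvStepA ([], []) d).1 (pvStepA ([], []) d).2 d) := by
  have h0 : pvStepB none d = pvStepB (some (pvAKey [] [] d)) d := by
    simp only [pvStepB, pvAKey, pvKey]
    rcases hsome : PySem.List.index? ((PySem.Str.split? d "_").getD []) "corr" with _ | i
    · by_cases hend : PySem.Str.endswith d "_opt" = true <;>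
        simp only [hsome, hend, Bool.false_eq_true, if_true, if_false] <;> norm_num [pvLtKey]
    · simp only [hsome]
      rcases hget : PySem.List.pyGet? ((PySem.Str.split? d "_").getD []) ((i : Int) + 1) with _ | p
      · norm_num [pvLtKey]
      · rcases hnum : PySem.Int.ofStr? p with _ | num <;> simp only [hnum] <;> norm_num [pvLtKey]
  rw [h0, pv_step]

theorem pv_finish (st : List String) (co : List (String × Int × Bool × Bool)) (fb : String) :
    (match PySem.List.sorted2 co (fun x => -x.2.1) (fun x => 2 * pvB x.2.2.1 - pvB x.2.2.2) with
      | x :: _ => some x.1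
      | [] =>
        match st with
        | s :: _ => some s
        | [] => some fb) = some (pvAKey st co fb).2 := by
  rcases co with _ | ⟨c, cs⟩
  · rcases st with _ | ⟨s, ss⟩ <;> rfl
  · have h : (PySem.List.sorted2 (c :: cs) (fun x => -x.2.1)
        (fun x => 2 * pvB x.2.2.1 - pvB x.2.2.2)).head? = some (pvFwmin c cs) := by
      rw [pv_sorted2_eq]
      simpa [PySem.List.insertBy, pvFwmin] using pv_foldl_insertBy_head pvBefore cs c []
    rcases hs : PySem.List.sorted2 (c :: cs) (fun x => -x.2.1)
        (fun x => 2 * pvB x.2.2.1 - pvB x.2.2.2) with _ | ⟨x, t⟩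
    · rw [hs] at h; simp at h
    · rw [hs] at h
      simp only [List.head?_cons, Option.some.injEq] at h
      simp [h, pvAKey]

-- ===== VERDICT (by name: the statement is the Claim_ definition above) =====
theorem select_best_calculation_spec : Claim_equal_select_best_calculation := by
  intro calc_dirs _
  unfold Spec_select_best_calculation select_best_calculation select_best_calculation_alt
  rcases calc_dirs with _ | ⟨d, rest⟩
  · rfl
  · simp only [List.foldl_cons, pv_step0, pv_main, Prod.mk.eta, Option.map_some, List.head?_cons]
    exact pv_finish _ _ d
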